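-- pv_equiv track=rewrite | github.com/PetitCoinCoin/advent-of-code | 2016/day_14.py | contains_multiple
-- ===== SOURCE A (Python) =====
-- def contains_multiple(raw: str, count: int, char: str = "") -> str:
--     if char:
--         if char * count in raw:
--             return char
--         return ""
--     for i in range(len(raw) - count + 1):
--         for c in range(1, count):
--             if raw[i + c] != raw[i]:
--                 break
--         else:
--             return raw[i]
--         continue
--     return ""
-- ===== SOURCE B (Python) =====
-- def contains_multiple(raw: str, count: int, char: str = "") -> str:
--     if char:
--         return char if char * count in raw else ""
--     if count <= 1:
--         return raw[0] if raw else ""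
--     prev = None
--     run = 0
--     for ch in raw:
--         run = run + 1 if ch == prev else 1
--         prev = ch
--         if run == count:
--             return ch
--     return ""
-- ===== Notes on version B (the rewrite author's own statement) =====
-- stated objective: simpler
-- what changed: Replaced the nested index-window loop (for each start index, re-check count-1 following characters) with a single left-to-right run-length scan that tracks the previous character and the current run length, returning as soon as a run reaches count.
import Mathlib
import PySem

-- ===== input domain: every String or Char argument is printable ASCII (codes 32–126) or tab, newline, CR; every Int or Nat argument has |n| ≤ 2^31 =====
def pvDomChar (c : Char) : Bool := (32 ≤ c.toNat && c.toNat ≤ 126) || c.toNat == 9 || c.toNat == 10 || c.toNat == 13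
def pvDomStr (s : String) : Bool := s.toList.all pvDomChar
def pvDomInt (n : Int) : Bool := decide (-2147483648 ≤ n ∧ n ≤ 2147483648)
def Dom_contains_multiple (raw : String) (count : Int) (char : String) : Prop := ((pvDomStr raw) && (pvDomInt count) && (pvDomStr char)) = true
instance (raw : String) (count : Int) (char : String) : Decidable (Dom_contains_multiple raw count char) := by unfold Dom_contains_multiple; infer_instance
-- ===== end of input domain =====

-- B replaces A's nested index-window loop by a single left-to-right run-length scan (objective: simpler).

-- ===== PORT A =====
-- raw[i] as a 1-character string; "" stands for the IndexError case, which Pre_ excludes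
def pvA_get1 (l : List Char) (i : Int) : String :=
  match PySem.List.pyGet? l i with
  | some c => String.ofList [c]
  | none => ""

-- the inner 'for c in range(1, count): if raw[i+c] != raw[i]: break / else: return raw[i]'
def pvA_window (l : List Char) (count i : Int) : Bool :=
  (PySem.List.pyRange 1 count 1).all (fun c => PySem.List.pyGet? l (i + c) == PySem.List.pyGet? l i)

-- the outer 'for i in range(len(raw) - count + 1)' with early return
def pvA_scan (l : List Char) (count : Int) : List Int → String
  | [] => ""
  | i :: rest => if pvA_window l count i then pvA_get1 l i else pvA_scan l count rest

def contains_multiple (raw : String) (count : Int) (char : String) : String :=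
  if char = "" then
    pvA_scan raw.toList count (PySem.List.pyRange 0 ((raw.toList.length : Int) - count + 1) 1)
  else
    if PySem.Chars.isIn (PySem.List.pyRepeat char.toList count) raw.toList then char else ""

-- ===== PORT B =====
-- run-length scan: prev = previous character, run = length of the current run
def pvB_scan (count : Int) : List Char → Option Char → Int → String
  | [], _, _ => ""
  | ch :: rest, prev, run =>
    let run' := if some ch = prev then run + 1 else 1
    if run' = count then String.ofList [ch] else pvB_scan count rest (some ch) run'

def contains_multiple_alt (raw : String) (count : Int) (char : String) : String :=
  if char = "" then
    if count ≤ 1 then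
      match raw.toList with
      | [] => ""
      | c :: _ => String.ofList [c]
    else pvB_scan count raw.toList none 0
  else
    if PySem.Chars.isIn (PySem.List.pyRepeat char.toList count) raw.toList then char else ""

-- ===== PRECONDITION & SPEC =====
-- Pre_ excludes only char = "" with empty raw and count ≤ 0, where A evaluates raw[0] and raises IndexError.
def Pre_contains_multiple (raw : String) (count : Int) (char : String) : Prop :=
  ¬ (char = "" ∧ raw = "" ∧ count ≤ 0)
instance (raw : String) (count : Int) (char : String) : Decidable (Pre_contains_multiple raw count char) := by unfold Pre_contains_multiple; infer_instance

def pvWitness_contains_multiple : String × Int × String := ("aabbb", 3, "")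


def Spec_contains_multiple (raw : String) (count : Int) (char : String) (out : String) : Prop := out = contains_multiple_alt raw count char
instance (raw : String) (count : Int) (char : String) (out : String) : Decidable (Spec_contains_multiple raw count char out) := by unfold Spec_contains_multiple; infer_instance

-- ===== CLAIM (what is proved, stated in full; the proofs are below) =====
def Claim_equal_contains_multiple : Prop := ∀ (raw : String) (count : Int) (char : String), Dom_contains_multiple raw count char → Pre_contains_multiple raw count char → Spec_contains_multiple raw count char (contains_multiple raw count char)


-- ===== LEMMAS AND PROOFS =====

-- common specification: the 1-char string of the first character starting a run of k equal characters
def pvFB (k : Nat) : List Char → String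
  | [] => ""
  | c :: rest => if (c :: rest).take k = List.replicate k c then String.ofList [c] else pvFB k rest

theorem pvFB_short (k : Nat) (l : List Char) (h : l.length < k) : pvFB k l = "" := by
  induction l with
  | nil => rfl
  | cons c rest ih =>
    simp only [pvFB]
    rw [if_neg, ih (by simp at h ⊢; omega)]
    intro hc
    have := congrArg List.length hc
    simp at this h
    omega

theorem pvFB_skip (k r : Nat) (p ch : Char) (rest : List Char) (hr : r < k) (hne : ch ≠ p) :
    pvFB k (List.replicate r p ++ ch :: rest) = pvFB k (ch :: rest) := by
  induction r with
  | zero => simp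
  | succ r ih =>
    rw [List.replicate_succ, List.cons_append]
    have hu : pvFB k (p :: (List.replicate r p ++ ch :: rest)) =
        if (p :: (List.replicate r p ++ ch :: rest)).take k = List.replicate k p
        then String.ofList [p] else pvFB k (List.replicate r p ++ ch :: rest) := rfl
    rw [hu, if_neg, ih (by omega)]
    intro hc
    have h1 := congrArg (fun t => t[r + 1]?) hc
    simp only [List.getElem?_take, List.getElem?_replicate] at h1
    have h2 : (p :: (List.replicate r p ++ ch :: rest))[r + 1]? = some ch := by
      simp
    rw [if_pos hr, if_pos hr, h2] at h1
    exact hne (Option.some.injEq .. ▸ h1)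

theorem pvB_scan_eq (k : Nat) (hk2 : 2 ≤ k) (l : List Char) :
    ∀ (r : Nat) (p : Char), 1 ≤ r → r < k →
      pvB_scan (k : Int) l (some p) (r : Int) = pvFB k (List.replicate r p ++ l) := by
  induction l with
  | nil =>
    intro r p _ hrk
    rw [pvFB_short k _ (by simp; omega)]
    rfl
  | cons ch rest ih =>
    intro r p hr1 hrk
    show (if (if some ch = some p then (r : Int) + 1 else 1) = (k : Int)
          then String.ofList [ch]
          else pvB_scan (k : Int) rest (some ch) (if some ch = some p then (r : Int) + 1 else 1))
        = pvFB k (List.replicate r p ++ ch :: rest)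
    by_cases hcp : ch = p
    · subst hcp
      rw [if_pos rfl]
      have hlist : List.replicate r ch ++ ch :: rest = List.replicate (r + 1) ch ++ rest := by
        rw [List.replicate_succ' (n := r)]; simp
      by_cases hrun : (r : Int) + 1 = (k : Int)
      · have hrk' : r + 1 = k := by exact_mod_cast hrun
        rw [if_pos hrun, hlist, hrk']
        have hsplit : List.replicate k ch ++ rest = ch :: (List.replicate (k-1) ch ++ rest) := by
          conv_lhs => rw [show k = (k-1)+1 by omega, List.replicate_succ]
          simp
        rw [hsplit]
        have hu : pvFB k (ch :: (List.replicate (k-1) ch ++ rest)) =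
            if (ch :: (List.replicate (k-1) ch ++ rest)).take k = List.replicate k ch
            then String.ofList [ch] else pvFB k (List.replicate (k-1) ch ++ rest) := rfl
        rw [hu, if_pos]
        rw [← hsplit, List.take_append_of_le_length (by simp), List.take_replicate]
        simp
      · have hlt : r + 1 < k := by omega
        rw [if_neg hrun]
        have hcast : ((r : Int) + 1) = ((r + 1 : Nat) : Int) := by push_cast; ring
        rw [hcast, ih (r+1) ch (by omega) hlt, hlist]
    · rw [if_neg (by simp [hcp] : ¬ (some ch = some p)), if_neg (by omega : ¬ ((1:Int) = (k:Int)))]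
      have h1 := ih 1 ch (le_refl 1) (by omega)
      simp only [Nat.cast_one] at h1
      rw [h1, List.replicate_one, List.singleton_append, pvFB_skip k r p ch rest hrk hcp]


theorem pvGet_shift (c : Char) (rest : List Char) (i : Int) (h : 0 ≤ i) :
    PySem.List.pyGet? (c :: rest) (i + 1) = PySem.List.pyGet? rest i := by
  obtain ⟨n, rfl⟩ : ∃ n : Nat, i = (n : Int) := ⟨i.toNat, by omega⟩
  rw [PySem.List.pyGet?_cons_succ]

theorem pvA_window_shift (c : Char) (rest : List Char) (count i : Int) (h : 0 ≤ i) :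
    pvA_window (c :: rest) count (i + 1) = pvA_window rest count i := by
  simp only [pvA_window]
  rw [Bool.eq_iff_iff, List.all_eq_true, List.all_eq_true]
  have key : ∀ j ∈ PySem.List.pyRange 1 count 1,
      (PySem.List.pyGet? (c :: rest) (i + 1 + j) = PySem.List.pyGet? (c :: rest) (i + 1)) ↔
      (PySem.List.pyGet? rest (i + j) = PySem.List.pyGet? rest i) := by
    intro j hj
    have hj1 : 1 ≤ j := (PySem.List.mem_pyRange_one.mp hj).1
    rw [show i + 1 + j = (i + j) + 1 by ring, pvGet_shift c rest (i + j) (by omega),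
        pvGet_shift c rest i h]
  constructor
  · intro hall j hj
    simpa using (key j hj).mp (by simpa using hall j hj)
  · intro hall j hj
    simpa using (key j hj).mpr (by simpa using hall j hj)

theorem pvA_get1_shift (c : Char) (rest : List Char) (i : Int) (h : 0 ≤ i) :
    pvA_get1 (c :: rest) (i + 1) = pvA_get1 rest i := by
  simp only [pvA_get1, pvGet_shift c rest i h]

theorem pvA_scan_shift (c : Char) (rest : List Char) (count : Int) (idxs : List Int)
    (h : ∀ i ∈ idxs, 0 ≤ i) :
    pvA_scan (c :: rest) count (idxs.map (fun i => i + 1)) = pvA_scan rest count idxs := by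
  induction idxs with
  | nil => rfl
  | cons i is ih =>
    have hi : 0 ≤ i := h i (by simp)
    simp only [List.map_cons, pvA_scan, pvA_window_shift c rest count i hi,
      pvA_get1_shift c rest i hi, ih (fun j hj => h j (by simp [hj]))]

theorem pvRange_one_shift (m : Int) :
    PySem.List.pyRange 1 m 1 = (PySem.List.pyRange 0 (m - 1) 1).map (fun i => i + 1) := by
  rw [PySem.List.pyRange_one, PySem.List.pyRange_one, List.map_map]
  have : m - 1 - 0 = m - 1 := by ring
  rw [this]
  apply List.map_congr_left
  intro x _
  simp [Function.comp]
  ring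

theorem pvTake_replicate_iff (c : Char) (rest : List Char) (k : Nat) :
    (c :: rest).take k = List.replicate k c ↔ ∀ j < k, (c :: rest)[j]? = some c := by
  constructor
  · intro h j hj
    have := congrArg (fun t => t[j]?) h
    simp only [List.getElem?_take, List.getElem?_replicate, if_pos hj] at this
    exact this
  · intro h
    apply List.ext_getElem?
    intro j
    by_cases hj : j < k
    · rw [List.getElem?_take, if_pos hj, List.getElem?_replicate, if_pos hj]
      exact h j hj
    · rw [List.getElem?_take, if_neg hj, List.getElem?_replicate, if_neg hj]
  
theorem pvA_window_iff (c : Char) (rest : List Char) (k : Nat)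
    (hlen : k ≤ rest.length + 1) :
    pvA_window (c :: rest) (k : Int) 0 = true ↔ (c :: rest).take k = List.replicate k c := by
  rw [pvTake_replicate_iff c rest k]
  simp only [pvA_window, List.all_eq_true]
  constructor
  · intro hall j hj
    match j with
    | 0 => simp
    | j + 1 =>
      have hmem : ((j : Int) + 1) ∈ PySem.List.pyRange 1 (k : Int) 1 := by
        rw [PySem.List.mem_pyRange_one]; omega
      have := hall _ hmem
      rw [show (0 : Int) + ((j : Int) + 1) = ((j : Int) + 1) by ring] at this
      simp only [PySem.List.pyGet?_cons_succ, PySem.List.pyGet?_natCast,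
        PySem.List.pyGet?_zero_cons, beq_iff_eq] at this
      have hjr : j < rest.length := by omega
      simp [List.getElem?_cons_succ, this]
  · intro h j hj
    have hj1 : 1 ≤ j := (PySem.List.mem_pyRange_one.mp hj).1
    have hjk : j < (k : Int) := (PySem.List.mem_pyRange_one.mp hj).2
    obtain ⟨n, rfl⟩ : ∃ n : Nat, j = ((n : Int) + 1) := ⟨(j - 1).toNat, by omega⟩
    have := h (n + 1) (by omega)
    rw [show (0 : Int) + ((n : Int) + 1) = ((n : Int) + 1) by ring]
    simp only [PySem.List.pyGet?_cons_succ, PySem.List.pyGet?_natCast,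
      PySem.List.pyGet?_zero_cons, beq_iff_eq]
    simpa using this

theorem pvA_scan_eq (k : Nat) (hk : 1 ≤ k) (l : List Char) :
    pvA_scan l (k : Int) (PySem.List.pyRange 0 ((l.length : Int) - (k : Int) + 1) 1) = pvFB k l := by
  induction l with
  | nil =>
    rw [PySem.List.pyRange_one_eq_nil (by simp; omega)]
    rfl
  | cons c rest ih =>
    by_cases hlen : ((c :: rest).length : Int) - (k : Int) + 1 ≤ 0
    · rw [PySem.List.pyRange_one_eq_nil hlen, pvFB_short k _ (by simp at hlen ⊢; omega)]
      rfl
    · have hkn : k ≤ rest.length + 1 := by simp at hlen; omega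
      rw [PySem.List.pyRange_one_cons (by omega)]
      simp only [pvA_scan]
      by_cases hw : pvA_window (c :: rest) (k : Int) 0 = true
      · rw [if_pos hw]
        have htake := (pvA_window_iff c rest k hkn).mp hw
        have hu : pvFB k (c :: rest) =
            if (c :: rest).take k = List.replicate k c
            then String.ofList [c] else pvFB k rest := rfl
        rw [hu, if_pos htake]
        simp [pvA_get1]
      · rw [if_neg hw]
        have hu : pvFB k (c :: rest) =
            if (c :: rest).take k = List.replicate k c
            then String.ofList [c] else pvFB k rest := rfl
        rw [hu, if_neg (fun h => hw ((pvA_window_iff c rest k hkn).mpr h))]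
        have hm : ((c :: rest).length : Int) - (k : Int) + 1 - 1 = (rest.length : Int) - (k : Int) + 1 := by
          simp; ring
        rw [zero_add, pvRange_one_shift, hm, pvA_scan_shift c rest (k : Int) _
          (fun i hi => (PySem.List.mem_pyRange_one.mp hi).1)]
        exact ih

theorem contains_multiple_spec : Claim_equal_contains_multiple := by
  intro raw count char hdom hpre
  unfold Spec_contains_multiple contains_multiple contains_multiple_alt
  by_cases hchar : char = ""
  · rw [if_pos hchar, if_pos hchar]
    by_cases hc1 : count ≤ 1
    · rw [if_pos hc1]
      cases hl : raw.toList with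
      | nil =>
        have hraw : raw = "" := by
          have := congrArg String.ofList hl
          simpa using this
        have hcount : count = 1 := by
          unfold Pre_contains_multiple at hpre
          have h0 : ¬ count ≤ 0 := fun hc => hpre ⟨hchar, hraw, hc⟩
          omega
        rw [hcount]
        rw [PySem.List.pyRange_one_eq_nil (by simp)]
        rfl
      | cons c rest =>
        have hpos : (0 : Int) < ((c :: rest).length : Int) - count + 1 := by
          simp; omega
        rw [PySem.List.pyRange_one_cons (by omega)]
        simp only [pvA_scan]
        have hwin : pvA_window (c :: rest) count 0 = true := by
          simp only [pvA_window]
          rw [PySem.List.pyRange_one_eq_nil (by omega)]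
          rfl
        rw [if_pos hwin]
        simp [pvA_get1]
    · rw [if_neg hc1]
      have hk : count = ((count.toNat : Nat) : Int) := by omega
      have hk2 : 2 ≤ count.toNat := by omega
      rw [hk, pvA_scan_eq count.toNat (by omega) raw.toList]
      cases hl : raw.toList with
      | nil => rfl
      | cons c rest =>
        show pvFB count.toNat (c :: rest) =
          (if (if some c = none then (0 : Int) + 1 else 1) = ((count.toNat : Nat) : Int)
           then String.ofList [c]
           else pvB_scan ((count.toNat : Nat) : Int) rest (some c)
             (if some c = none then (0 : Int) + 1 else 1))
        rw [if_neg (by simp : ¬ (some c = none))]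
        rw [if_neg (by omega : ¬ ((1 : Int) = ((count.toNat : Nat) : Int)))]
        have := pvB_scan_eq count.toNat hk2 rest 1 c (le_refl 1) (by omega)
        simp only [Nat.cast_one] at this
        rw [this, List.replicate_one, List.singleton_append]
  · rw [if_neg hchar, if_neg hchar]
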